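-- pv_equiv track=rewrite | github.com/madinhos/PYTHON | lekcja4/42.py | prostokat
-- ===== SOURCE A (Python) =====
-- def prostokat(X,Y):
-- 	try:
-- 		result = ''
-- 		helper = 0
--
-- 		if Y == 1:
-- 			helper = 3;
-- 		if Y > 1:
-- 			helper = (Y*2)+1
--
-- 		for i in range(helper):
-- 			if i%2 != 0:
-- 				result +="|"
-- 				for j in range(X):
-- 					result +="   |"
-- 				result +="\n"
-- 			if i%2 == 0:
-- 				result +="+"
-- 				for j in range(X):
-- 					result +="---+"
-- 				result +="\n"
--
-- 		return result
-- 	except ValueError: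
-- 		return "To nie jest liczba!"
-- ===== SOURCE B (Python) =====
-- def prostokat(X, Y):
--     try:
--         if Y <= 0:
--             return ""
--         n = 1 if Y == 1 else Y
--         border = "+" + "---+" * X
--         content = "|" + "   |" * X
--         return border + "\n" + (content + "\n" + border + "\n") * n
--     except ValueError:
--         return "To nie jest liczba!"
-- ===== Notes on version B (the rewrite author's own statement) =====
-- stated objective: simpler
-- what changed: Replaces A's i%2-alternating loop over range(2*Y+1) with nested per-cell loops by precomputing the border and content rows via string multiplication and returning a closed-form concatenation (border + n repetitions of the content/border block).
import Mathlib
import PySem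

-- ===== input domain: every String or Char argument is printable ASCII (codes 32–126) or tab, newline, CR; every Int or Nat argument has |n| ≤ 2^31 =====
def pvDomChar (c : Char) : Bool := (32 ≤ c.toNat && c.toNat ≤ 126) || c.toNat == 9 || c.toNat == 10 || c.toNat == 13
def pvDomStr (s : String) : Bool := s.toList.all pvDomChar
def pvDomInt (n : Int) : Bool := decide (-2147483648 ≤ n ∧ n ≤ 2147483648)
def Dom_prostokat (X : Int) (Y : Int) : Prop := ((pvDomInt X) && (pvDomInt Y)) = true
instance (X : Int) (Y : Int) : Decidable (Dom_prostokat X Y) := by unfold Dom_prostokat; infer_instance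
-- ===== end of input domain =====

-- B replaces A's parity-alternating row loop by closed-form string multiplication (simpler).
-- A's try/except ValueError can never fire on int inputs, so neither port models it.

-- ===== PORT A =====
-- the body of A's outer loop over range(helper): odd i → content row, even i → border row
def prostokatBody (X : Int) (result : String) (i : Int) : String :=
  let result :=
    if PySem.Int.mod i 2 ≠ 0 then
      ((PySem.List.pyRange 0 X 1).foldl (fun r _ => r ++ "   |") (result ++ "|")) ++ "\n"
    else result
  if PySem.Int.mod i 2 == 0 then
    ((PySem.List.pyRange 0 X 1).foldl (fun r _ => r ++ "---+") (result ++ "+")) ++ "\n"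
  else result

-- literal transliteration of A: helper from the two sequential (mutually exclusive) ifs,
-- then the alternating loop over range(helper)
def prostokat (X : Int) (Y : Int) : String :=
  let helper : Int := if Y == 1 then 3 else if Y > 1 then Y * 2 + 1 else 0
  (PySem.List.pyRange 0 helper 1).foldl (prostokatBody X) ""

-- ===== PORT B =====
-- Python's  s * n  for a string s and int n (empty for n ≤ 0)
def pyStrMul (s : String) (n : Int) : String :=
  (List.replicate n.toNat s).foldl (· ++ ·) ""

def prostokat_alt (X : Int) (Y : Int) : String :=
  if Y ≤ 0 then ""
  else
    let n : Int := if Y == 1 then 1 else Y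
    let border := "+" ++ pyStrMul "---+" X
    let content := "|" ++ pyStrMul "   |" X
    border ++ "\n" ++ pyStrMul (content ++ "\n" ++ border ++ "\n") n

-- ===== PRECONDITION & SPEC =====
def Spec_prostokat (X : Int) (Y : Int) (out : String) : Prop := out = prostokat_alt X Y
instance (X : Int) (Y : Int) (out : String) : Decidable (Spec_prostokat X Y out) := by unfold Spec_prostokat; infer_instance

-- ===== CLAIM (what is proved, stated in full; the proofs are below) =====
def Claim_equal_prostokat : Prop := ∀ (X : Int) (Y : Int), Dom_prostokat X Y → Spec_prostokat X Y (prostokat X Y)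

-- ===== LEMMAS AND PROOFS =====

-- Nat-indexed repetition, the core of pyStrMul
def repS (s : String) (k : Nat) : String := (List.replicate k s).foldl (· ++ ·) ""

theorem pyStrMul_eq_repS (s : String) (n : Int) : pyStrMul s n = repS s n.toNat := rfl

theorem foldl_append_init (l : List String) (a : String) :
    l.foldl (· ++ ·) a = a ++ l.foldl (· ++ ·) "" := by
  induction l generalizing a with
  | nil => simp
  | cons b l ih =>
    simp only [List.foldl_cons]
    rw [ih (a ++ b), ih ("" ++ b)]
    simp [String.append_assoc]

theorem repS_succ_left (s : String) (k : Nat) : repS s (k + 1) = s ++ repS s k := by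
  simp only [repS, List.replicate_succ, List.foldl_cons]
  rw [foldl_append_init]
  simp

theorem repS_succ_right (s : String) (k : Nat) : repS s (k + 1) = repS s k ++ s := by
  simp [repS, List.replicate_succ']

-- A's inner loop over range(X) appends the same string X times
theorem foldl_const_append {α : Type} (l : List α) (s acc : String) :
    l.foldl (fun r _ => r ++ s) acc = acc ++ repS s l.length := by
  induction l generalizing acc with
  | nil => simp [repS]
  | cons b l ih =>
    simp only [List.foldl_cons, List.length_cons]
    rw [ih, repS_succ_left, String.append_assoc]

theorem inner_loop (s : String) (X : Int) (acc : String) :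
    (PySem.List.pyRange 0 X 1).foldl (fun r _ => r ++ s) acc = acc ++ pyStrMul s X := by
  rw [foldl_const_append, pyStrMul_eq_repS, PySem.List.length_pyRange_one]
  norm_num

theorem mod_two_odd (n : Nat) : PySem.Int.mod (2 * (n : Int) + 1) 2 = 1 := by
  rw [PySem.Int.mod_eq_emod_of_pos (by norm_num : (0:Int) < 2)]
  omega

theorem body_odd (X : Int) (acc : String) (n : Nat) :
    prostokatBody X acc (2 * (n : Int) + 1) = acc ++ ("|" ++ pyStrMul "   |" X ++ "\n") := by
  simp only [prostokatBody]
  rw [if_pos (show PySem.Int.mod (2 * (n : Int) + 1) 2 ≠ 0 by rw [mod_two_odd]; norm_num),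
      if_neg (show ¬ ((PySem.Int.mod (2 * (n : Int) + 1) 2 == 0) = true) by
        rw [mod_two_odd]; simp)]
  rw [inner_loop]
  simp [String.append_assoc]

theorem body_even (X : Int) (acc : String) (n : Nat) :
    prostokatBody X acc (2 * (n : Int)) = acc ++ ("+" ++ pyStrMul "---+" X ++ "\n") := by
  have hm : PySem.Int.mod (2 * (n : Int)) 2 = 0 := by
    rw [PySem.Int.mod_eq_emod_of_pos (by norm_num : (0:Int) < 2)]; omega
  simp only [prostokatBody]
  rw [if_neg (show ¬ (PySem.Int.mod (2 * (n : Int)) 2 ≠ 0) by rw [hm]; simp),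
      if_pos (show (PySem.Int.mod (2 * (n : Int)) 2 == 0) = true by rw [hm]; simp)]
  rw [inner_loop]
  simp [String.append_assoc]

-- characterisation of A's outer loop when helper = 2*n + 1
theorem outer_loop (X : Int) (n : Nat) :
    (PySem.List.pyRange 0 (2 * (n : Int) + 1) 1).foldl (prostokatBody X) "" =
    ("+" ++ pyStrMul "---+" X) ++ "\n" ++
      repS (("|" ++ pyStrMul "   |" X) ++ "\n" ++ (("+" ++ pyStrMul "---+" X) ++ "\n")) n := by
  induction n with
  | zero =>
    rw [show (2 * ((0 : Nat) : Int) + 1) = 0 + 1 by norm_num, PySem.List.pyRange_one_singleton]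
    simp only [List.foldl_cons, List.foldl_nil]
    rw [show (0 : Int) = 2 * ((0 : Nat) : Int) by norm_num, body_even]
    simp [repS, String.append_assoc]
  | succ n ih =>
    have h1 : (2 * ((n + 1 : Nat) : Int) + 1) = (2 * (n : Int) + 1 + 1) + 1 := by push_cast; ring
    rw [h1, PySem.List.pyRange_one_succ_right (by omega),
        PySem.List.pyRange_one_succ_right (by omega),
        List.foldl_append, List.foldl_append, ih]
    simp only [List.foldl_cons, List.foldl_nil]
    rw [body_odd, show (2 * (n : Int) + 1 + 1) = 2 * ((n + 1 : Nat) : Int) by push_cast; ring,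
        body_even, repS_succ_right]
    simp [String.append_assoc]

-- ===== VERDICT (by name: the statement is the Claim_ definition above) =====
theorem prostokat_spec : Claim_equal_prostokat := by
  intro X Y _
  unfold Spec_prostokat
  rcases lt_trichotomy Y 1 with hY | hY | hY
  · -- Y ≤ 0 : helper = 0, empty loop; B returns ""
    simp only [prostokat, prostokat_alt, beq_iff_eq,
      if_neg (show ¬ Y = 1 by omega), if_neg (show ¬ Y > 1 by omega),
      if_pos (show Y ≤ 0 by omega)]
    rw [PySem.List.pyRange_one_eq_nil (le_refl 0)]
    rfl
  · -- Y = 1 : helper = 3 = 2*1+1, one content row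
    subst hY
    have h : prostokat X 1 =
        (PySem.List.pyRange 0 (2 * ((1 : Nat) : Int) + 1) 1).foldl (prostokatBody X) "" := by
      norm_num [prostokat]
    rw [h, outer_loop]
    norm_num [prostokat_alt, pyStrMul_eq_repS, repS, String.append_assoc]
  · -- Y > 1 : helper = 2*Y+1, Y content rows
    simp only [prostokat, prostokat_alt, beq_iff_eq,
      if_neg (show ¬ Y = 1 by omega), if_pos (show Y > 1 by omega),
      if_neg (show ¬ Y ≤ 0 by omega)]
    rw [show Y * 2 + 1 = 2 * ((Y.toNat : Int)) + 1 by omega, outer_loop]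
    simp only [pyStrMul_eq_repS]
    simp [String.append_assoc]
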